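-- pv_equiv track=rewrite | github.com/tomdcsmith/eva-cttv-pipeline | resources/june16/trait_mapping/mapping_trait_to_url_using_rcv.py | get_trait_to_url
-- ===== SOURCE A (Python) =====
-- from collections import defaultdict
-- import copy
--
-- def get_trait_to_url(rcv_to_trait, rcv_to_urls):
--     rcv_to_trait = copy.deepcopy(rcv_to_trait)
--     rcv_to_urls = copy.deepcopy(rcv_to_urls)
--
--     rcvs_no_url = set()
--     rcvs_no_trait = set()
--     trait_no_url = set()
--     trait_to_urls = defaultdict(set)
--     for rcv, trait in copy.deepcopy(rcv_to_trait).items():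
--         if rcv not in rcv_to_urls:
--             rcvs_no_url.add(rcv)
--             trait_no_url.add(trait)
--             del rcv_to_trait[rcv]
--             continue
--
--         new_urls = rcv_to_urls[rcv]
--         trait_to_urls[trait].update(new_urls)
--
--         del rcv_to_urls[rcv]
--
--         if trait in trait_no_url:
--             trait_no_url.remove(trait)
--
--     for rcv, urls in rcv_to_urls.items():
--         rcvs_no_trait.add(rcv)
--
--     return trait_to_urls, rcvs_no_url, rcvs_no_trait, trait_no_url
-- ===== SOURCE B (Python) =====
-- def get_trait_to_url(rcv_to_trait, rcv_to_urls):
--     linked = [(rcv, trait) for rcv, trait in rcv_to_trait.items() if rcv in rcv_to_urls]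
--     traits = list(dict.fromkeys(trait for _, trait in linked))
--     trait_to_urls = {
--         trait: {url for rcv, tr in linked if tr == trait for url in rcv_to_urls[rcv]}
--         for trait in traits}
--     rcvs_no_url = set(rcv for rcv in rcv_to_trait if rcv not in rcv_to_urls)
--     rcvs_no_trait = set(rcv for rcv in rcv_to_urls if rcv not in rcv_to_trait)
--     trait_no_url = set()
--     for rcv, trait in rcv_to_trait.items():
--         if rcv in rcv_to_urls:
--             trait_no_url.discard(trait)
--         else:
--             trait_no_url.add(trait)
--     return trait_to_urls, rcvs_no_url, rcvs_no_trait, trait_no_url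
-- ===== Notes on version B (the rewrite author's own statement) =====
-- stated objective: alternative
-- what changed: A's single loop that mutates both input dicts (with deepcopy and del) and five accumulators at once is replaced by four independent passes: a filtered 'linked' list with a dedup'd trait order and a per-trait nested scan for trait_to_urls, two membership-filter comprehensions for rcvs_no_url/rcvs_no_trait, and a separate add/discard fold for the order-dependent trait_no_url.
import Mathlib
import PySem

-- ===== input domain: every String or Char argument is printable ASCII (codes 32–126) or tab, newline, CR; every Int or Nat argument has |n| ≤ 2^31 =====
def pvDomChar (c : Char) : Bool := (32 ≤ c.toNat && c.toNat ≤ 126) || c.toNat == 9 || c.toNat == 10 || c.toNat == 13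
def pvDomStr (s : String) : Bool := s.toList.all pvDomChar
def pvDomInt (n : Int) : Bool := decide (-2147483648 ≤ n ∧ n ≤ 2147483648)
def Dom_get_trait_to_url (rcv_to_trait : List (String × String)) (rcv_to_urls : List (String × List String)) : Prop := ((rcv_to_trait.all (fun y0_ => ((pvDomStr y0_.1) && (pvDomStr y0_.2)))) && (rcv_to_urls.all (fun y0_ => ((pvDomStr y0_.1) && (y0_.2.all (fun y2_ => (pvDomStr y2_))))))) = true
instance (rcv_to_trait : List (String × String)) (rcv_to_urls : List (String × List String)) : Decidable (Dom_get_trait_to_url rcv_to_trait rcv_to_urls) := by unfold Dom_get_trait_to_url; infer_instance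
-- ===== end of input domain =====

-- B computes the four outputs in independent passes/comprehensions instead of A's single mutating loop (same cost; objective: alternative decomposition).
-- Equivalence is about return values; A deep-copies its arguments so neither version observably mutates the caller's dicts.


-- ===== PORT A =====
-- One loop over a snapshot of rcv_to_trait, mutating both dicts and all four accumulators;
-- trait_no_url.remove(trait) after the membership check is Set.discard on a member.
def pvStepA
    (st : PySem.Dict String String × PySem.Dict String (List String) × PySem.Set String × PySem.Set String × PySem.Dict String (PySem.Set String))
    (p : String × String) :
    PySem.Dict String String × PySem.Dict String (List String) × PySem.Set String × PySem.Set String × PySem.Dict String (PySem.Set String) :=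
  let (t, u, rcvs_no_url, trait_no_url, trait_to_urls) := st
  if u.contains p.1 = false then
    (t.erase p.1, u, rcvs_no_url.add p.1, trait_no_url.add p.2, trait_to_urls)
  else
    let new_urls := u.getD p.1 []
    let trait_to_urls := trait_to_urls.modify p.2 [] (fun s => new_urls.foldl PySem.Set.add s)
    let u := u.erase p.1
    let trait_no_url := if p.2 ∈ trait_no_url then trait_no_url.discard p.2 else trait_no_url
    (t, u, rcvs_no_url, trait_no_url, trait_to_urls)

def get_trait_to_url (rcv_to_trait : List (String × String)) (rcv_to_urls : List (String × List String)) : (List (String × List String)) × List String × List String × List String :=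
  let t0 : PySem.Dict String String := PySem.Dict.ofList rcv_to_trait
  let u0 : PySem.Dict String (List String) := PySem.Dict.ofList rcv_to_urls
  let fin := t0.items.foldl (pvStepA) (t0, u0, PySem.Set.empty, PySem.Set.empty, PySem.Dict.empty)
  let rcvs_no_trait := fin.2.1.items.foldl (fun s p => s.add p.1) PySem.Set.empty
  (fin.2.2.2.2.items, fin.2.2.1, rcvs_no_trait, fin.2.2.2.1)

-- ===== PORT B =====
-- Four independent passes: linked pairs, dedup'd trait order with a per-trait nested scan,
-- two filters for the missing-rcv sets, and a discard/add fold for trait_no_url.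
def get_trait_to_url_alt (rcv_to_trait : List (String × String)) (rcv_to_urls : List (String × List String)) : (List (String × List String)) × List String × List String × List String :=
  let t : PySem.Dict String String := PySem.Dict.ofList rcv_to_trait
  let u : PySem.Dict String (List String) := PySem.Dict.ofList rcv_to_urls
  let linked := t.items.filter (fun p => u.contains p.1)
  let traits := PySem.List.dedup (linked.map (·.2))
  let trait_to_urls := traits.map (fun tr =>
    (tr, PySem.Set.ofList ((linked.filter (fun p => p.2 == tr)).flatMap (fun p => u.getD p.1 []))))
  let rcvs_no_url := PySem.Set.ofList (t.keys.filter (fun k => !u.contains k))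
  let rcvs_no_trait := PySem.Set.ofList (u.keys.filter (fun k => !t.contains k))
  let trait_no_url := t.items.foldl
    (fun s p => if u.contains p.1 then s.discard p.2 else s.add p.2) PySem.Set.empty
  (trait_to_urls, rcvs_no_url, rcvs_no_trait, trait_no_url)

-- ===== PRECONDITION & SPEC =====
def Spec_get_trait_to_url (rcv_to_trait : List (String × String)) (rcv_to_urls : List (String × List String)) (out : (List (String × List String)) × List String × List String × List String) : Prop := out = get_trait_to_url_alt rcv_to_trait rcv_to_urls
instance (rcv_to_trait : List (String × String)) (rcv_to_urls : List (String × List String)) (out : (List (String × List String)) × List String × List String × List String) : Decidable (Spec_get_trait_to_url rcv_to_trait rcv_to_urls out) := by unfold Spec_get_trait_to_url; infer_instance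

-- ===== CLAIM (what is proved, stated in full; the proofs are below) =====
def Claim_equal_get_trait_to_url : Prop := ∀ (rcv_to_trait : List (String × String)) (rcv_to_urls : List (String × List String)), Dom_get_trait_to_url rcv_to_trait rcv_to_urls → Spec_get_trait_to_url rcv_to_trait rcv_to_urls (get_trait_to_url rcv_to_trait rcv_to_urls)

-- ===== LEMMAS AND PROOFS =====

lemma dict_contains_erase_of_ne {κ ν : Type} [BEq κ] [LawfulBEq κ] (d : PySem.Dict κ ν) (k k' : κ)
    (h : k' ≠ k) : (d.erase k).contains k' = d.contains k' := by
  simp [PySem.Dict.erase, PySem.Dict.contains, List.any_filter]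
  refine PySem.List.any_congr_mem (fun p _ => ?_)
  by_cases hpk : p.1 = k'
  · subst hpk; simp [h]
  · simp [hpk]

lemma dict_get?_erase_of_ne {κ ν : Type} [BEq κ] [LawfulBEq κ] (d : PySem.Dict κ ν) (k k' : κ)
    (h : k' ≠ k) : (d.erase k).get? k' = d.get? k' := by
  simp only [PySem.Dict.erase, PySem.Dict.get?]
  congr 1
  induction d.items with
  | nil => rfl
  | cons p l ih =>
      by_cases hp : p.1 = k
      · simp [hp, beq_eq_false_iff_ne.mpr (Ne.symm h), ih]
      · by_cases hp' : p.1 = k'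
        · simp [hp', h]
        · simp [hp, hp', ih]

lemma dict_getD_erase_of_ne {κ ν : Type} [BEq κ] [LawfulBEq κ] (d : PySem.Dict κ ν) (k k' : κ)
    (v : ν) (h : k' ≠ k) : (d.erase k).getD k' v = d.getD k' v := by
  simp [PySem.Dict.getD, dict_get?_erase_of_ne d k k' h]

lemma set_discard_of_not_mem {α : Type} [BEq α] [LawfulBEq α] (s : PySem.Set α) (x : α)
    (h : x ∉ s) : s.discard x = s := by
  simp only [PySem.Set.discard]
  refine List.filter_eq_self.mpr ?_
  intro y hy
  simp only [Bool.not_eq_eq_eq_not, Bool.not_true, beq_eq_false_iff_ne]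
  exact fun hxy => h (hxy ▸ hy)
lemma loopA_eq (l : List (String × String)) (hnd : (l.map (fun p => p.1)).Nodup)
    (t : PySem.Dict String String) (u : PySem.Dict String (List String))
    (nu tnu : PySem.Set String) (ttu : PySem.Dict String (PySem.Set String)) :
    l.foldl pvStepA (t, u, nu, tnu, ttu) =
      ( l.foldl (fun t' p => if u.contains p.1 then t' else t'.erase p.1) t,
        l.foldl (fun uu p => if u.contains p.1 then uu.erase p.1 else uu) u,
        l.foldl (fun s p => if u.contains p.1 then s else s.add p.1) nu,
        l.foldl (fun s p => if u.contains p.1 then (if p.2 ∈ s then s.discard p.2 else s) else s.add p.2) tnu,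
        l.foldl (fun d p => if u.contains p.1 then d.modify p.2 [] (fun s => (u.getD p.1 []).foldl PySem.Set.add s) else d) ttu ) := by
  induction l generalizing t u nu tnu ttu with
  | nil => rfl
  | cons p l ih =>
      simp only [List.map_cons, List.nodup_cons, List.mem_map] at hnd
      obtain ⟨hp, hnd⟩ := hnd
      have hne : ∀ q ∈ l, ¬ (q.1 = p.1) := fun q hq he => hp ⟨q, hq, he⟩
      simp only [List.foldl_cons]
      cases hc : u.contains p.1 with
      | false =>
          have hstep : pvStepA (t, u, nu, tnu, ttu) p
              = (t.erase p.1, u, nu.add p.1, tnu.add p.2, ttu) := by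
            simp [pvStepA, hc]
          rw [hstep, ih hnd]
          simp
      | true =>
          have hstep : pvStepA (t, u, nu, tnu, ttu) p
              = (t, u.erase p.1, nu,
                 (if p.2 ∈ tnu then tnu.discard p.2 else tnu),
                 ttu.modify p.2 [] (fun s => (u.getD p.1 []).foldl PySem.Set.add s)) := by
            simp [pvStepA, hc]
          rw [hstep, ih hnd]
          simp only [if_true]
          refine congrArg₂ _ ?_ (congrArg₂ _ ?_ (congrArg₂ _ ?_ (congrArg₂ _ ?_ ?_)))
          · exact PySem.List.foldl_congr_mem _ _ _ _ (fun acc q hq => by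
              rw [dict_contains_erase_of_ne u p.1 q.1 (hne q hq)])
          · exact PySem.List.foldl_congr_mem _ _ _ _ (fun acc q hq => by
              rw [dict_contains_erase_of_ne u p.1 q.1 (hne q hq)])
          · exact PySem.List.foldl_congr_mem _ _ _ _ (fun acc q hq => by
              rw [dict_contains_erase_of_ne u p.1 q.1 (hne q hq)])
          · exact PySem.List.foldl_congr_mem _ _ _ _ (fun acc q hq => by
              rw [dict_contains_erase_of_ne u p.1 q.1 (hne q hq)])
          · exact PySem.List.foldl_congr_mem _ _ _ _ (fun acc q hq => by
              rw [dict_contains_erase_of_ne u p.1 q.1 (hne q hq),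
                  dict_getD_erase_of_ne u p.1 q.1 [] (hne q hq)])

lemma map_fst_filter {α β : Type} (l : List (α × β)) (p : α → Bool) :
    (l.map (fun q => q.1)).filter p = (l.filter (fun q => p q.1)).map (fun q => q.1) := by
  induction l with
  | nil => rfl
  | cons q l ih => by_cases hq : p q.1 <;> simp [hq, ih]

lemma erase_fold_items (c : String × String → Bool) (l : List (String × String))
    (u : PySem.Dict String (List String)) :
    (l.foldl (fun uu p => if c p then uu.erase p.1 else uu) u).items
      = u.items.filter (fun q => !(l.any (fun p => c p && (q.1 == p.1)))) := by
  induction l generalizing u with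
  | nil => simp
  | cons p l ih =>
      simp only [List.foldl_cons]
      cases hc : c p with
      | false =>
          rw [if_neg (by simp), ih]
          refine List.filter_congr (fun q _ => ?_)
          simp [hc]
      | true =>
          rw [if_pos rfl, ih]
          simp only [PySem.Dict.erase, List.filter_filter]
          refine List.filter_congr (fun q _ => ?_)
          simp [hc, Bool.and_comm]

lemma modify_fold_getD (g : String × String → List String) (l : List (String × String))
    (d : PySem.Dict String (PySem.Set String)) (tr : String) :
    (l.foldl (fun d p => d.modify p.2 [] (fun s => (g p).foldl PySem.Set.add s)) d).getD tr []
      = ((l.filter (fun p => p.2 == tr)).flatMap g).foldl PySem.Set.add (d.getD tr []) := by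
  induction l generalizing d with
  | nil => simp
  | cons p l ih =>
      simp only [List.foldl_cons, List.filter_cons]
      by_cases hp : p.2 = tr
      · rw [if_pos (by simp [hp]), ih]
        simp only [List.flatMap_cons, List.foldl_append]
        rw [PySem.Dict.getD_modify]
        rw [if_pos hp.symm, hp]
      · rw [if_neg (by simp [hp]), ih]
        rw [PySem.Dict.getD_modify, if_neg (fun h => hp h.symm)]

lemma add_fold_keys {β : Type} (l : List (String × β)) :
    l.foldl (fun s p => s.add p.1) PySem.Set.empty = PySem.Set.ofList (l.map (fun p => p.1)) := by
  rw [← PySem.Set.update_map_eq_foldl_add]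
  rfl

lemma ttu_items_eq (l : List (String × String)) (u : PySem.Dict String (List String)) :
    (l.foldl (fun d p => if u.contains p.1 then d.modify p.2 [] (fun s => (u.getD p.1 []).foldl PySem.Set.add s) else d) PySem.Dict.empty).items
      = (PySem.List.dedup ((l.filter (fun p => u.contains p.1)).map (fun p => p.2))).map
          (fun tr => (tr, PySem.Set.ofList (((l.filter (fun p => u.contains p.1)).filter (fun p => p.2 == tr)).flatMap (fun p => u.getD p.1 [])))) := by
  rw [PySem.List.foldl_if_eq_foldl_filter]
  have hkeys : (((l.filter (fun p => u.contains p.1)).foldl (fun d p => d.modify p.2 [] (fun s => (u.getD p.1 []).foldl PySem.Set.add s)) PySem.Dict.empty)).keys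
      = PySem.Set.ofList ((l.filter (fun p => u.contains p.1)).map (fun p => p.2)) := by
    rw [PySem.Dict.keys_foldl_modify_key (l.filter (fun p => u.contains p.1)) (fun p => p.2) []
      (fun _ (p : String × String) s => (u.getD p.1 []).foldl PySem.Set.add s) PySem.Dict.empty]
    rw [PySem.Dict.keys_empty, PySem.Set.update_nil_left]
  have hnd : (((l.filter (fun p => u.contains p.1)).foldl (fun d p => d.modify p.2 [] (fun s => (u.getD p.1 []).foldl PySem.Set.add s)) PySem.Dict.empty)).keys.Nodup := by
    refine PySem.Dict.nodup_keys_foldl_modify_key _ (fun p => p.2) []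
      (fun _ (p : String × String) s => (u.getD p.1 []).foldl PySem.Set.add s) PySem.Dict.empty ?_
    simp [PySem.Dict.keys_empty]
  rw [PySem.Dict.items_eq_map_keys _ hnd [], hkeys, PySem.List.dedup_eq_ofList]
  refine List.map_congr_left (fun tr _ => ?_)
  rw [modify_fold_getD, PySem.Dict.getD_empty]
  rfl

lemma final_eq (rt : List (String × String)) (ru : List (String × List String)) :
    get_trait_to_url rt ru = get_trait_to_url_alt rt ru := by
  show (let t0 := PySem.Dict.ofList rt;
    let u0 := PySem.Dict.ofList ru;
    let fin := List.foldl pvStepA (t0, u0, PySem.Set.empty, PySem.Set.empty, PySem.Dict.empty) t0.items;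
    let rcvs_no_trait := List.foldl (fun s p => s.add p.1) PySem.Set.empty fin.2.1.items;
    (fin.2.2.2.2.items, fin.2.2.1, rcvs_no_trait, fin.2.2.2.1)) = _
  dsimp only
  have hndt : ((PySem.Dict.ofList rt).items.map (fun p => p.1)).Nodup := by
    simpa [PySem.Dict.keys] using PySem.Dict.nodup_keys_ofList rt
  rw [loopA_eq _ hndt]
  refine Prod.ext ?_ (Prod.ext ?_ (Prod.ext ?_ ?_))
  -- trait_to_urls
  · exact ttu_items_eq _ _
  -- rcvs_no_url
  · show (PySem.Dict.ofList rt).items.foldl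
        (fun s p => if (PySem.Dict.ofList ru).contains p.1 then s else s.add p.1) PySem.Set.empty = _
    have h1 : (PySem.Dict.ofList rt).items.foldl
        (fun s p => if (PySem.Dict.ofList ru).contains p.1 then s else s.add p.1) PySem.Set.empty
        = (PySem.Dict.ofList rt).items.foldl
        (fun s p => if (!(PySem.Dict.ofList ru).contains p.1) = true then s.add p.1 else s) PySem.Set.empty := by
      refine PySem.List.foldl_congr_mem _ _ _ _ (fun acc q _ => ?_)
      cases h : (PySem.Dict.ofList ru).contains q.1 <;> simp
    rw [h1, PySem.List.foldl_if_eq_foldl_filter, ← PySem.Set.update_map_eq_foldl_add]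
    show _ = PySem.Set.ofList (((PySem.Dict.ofList rt).items.map (fun x => x.1)).filter
        (fun k => !(PySem.Dict.ofList ru).contains k))
    rw [map_fst_filter]
    rfl
  -- rcvs_no_trait
  · show ((PySem.Dict.ofList rt).items.foldl
        (fun uu p => if (PySem.Dict.ofList ru).contains p.1 then uu.erase p.1 else uu)
        (PySem.Dict.ofList ru)).items.foldl (fun s p => s.add p.1) PySem.Set.empty = _
    rw [add_fold_keys, erase_fold_items]
    have h2 : ((PySem.Dict.ofList ru).items.filter
          (fun q => !((PySem.Dict.ofList rt).items.any (fun p => (PySem.Dict.ofList ru).contains p.1 && (q.1 == p.1)))))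
        = ((PySem.Dict.ofList ru).items.filter (fun q => !(PySem.Dict.ofList rt).contains q.1)) := by
      refine List.filter_congr (fun q hq => ?_)
      have hcq : (PySem.Dict.ofList ru).contains q.1 = true :=
        (PySem.Dict.contains_iff_mem_keys _ _).mpr (PySem.Dict.mem_keys_of_mem_items (PySem.Dict.ofList ru) hq)
      have hany : ((PySem.Dict.ofList rt).items.any (fun p => (PySem.Dict.ofList ru).contains p.1 && (q.1 == p.1)))
          = ((PySem.Dict.ofList rt).items.any (fun p => p.1 == q.1)) := by
        refine PySem.List.any_congr_mem (fun p _ => ?_)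
        by_cases h : q.1 = p.1
        · rw [← h, hcq]; simp
        · rw [beq_eq_false_iff_ne.mpr h, beq_eq_false_iff_ne.mpr (Ne.symm h)]
          simp
      rw [hany]; rfl
    rw [h2]
    show _ = PySem.Set.ofList (((PySem.Dict.ofList ru).items.map (fun x => x.1)).filter
        (fun k => !(PySem.Dict.ofList rt).contains k))
    rw [map_fst_filter]
  -- trait_no_url
  · refine PySem.List.foldl_congr_mem _ _ _ _ (fun acc q _ => ?_)
    cases h : (PySem.Dict.ofList ru).contains q.1 with
    | false => rw [if_neg (by simp), if_neg (by simp)]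
    | true =>
        rw [if_pos rfl, if_pos rfl]
        by_cases hm : q.2 ∈ acc
        · rw [if_pos hm]
        · rw [if_neg hm, set_discard_of_not_mem _ _ hm]

-- ===== VERDICT (by name: the statement is the Claim_ definition above) =====
theorem get_trait_to_url_spec : Claim_equal_get_trait_to_url := by
  intro rt ru _
  exact final_eq rt ru
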